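-- pv_equiv track=rewrite | github.com/Lubichlyp/awatar | generowanie.py | _prioritize_logo_images
-- ===== SOURCE A (Python) =====
-- def _prioritize_logo_images(image_urls: list[str]) -> list[str]:
--     unique: list[str] = []
--     seen: set[str] = set()
--     for url in image_urls:
--         value = (url or "").strip()
--         if not value or value in seen:
--             continue
--         seen.add(value)
--         unique.append(value)
--     return sorted(unique, key=lambda url: ("logo" not in url.lower(),))
-- ===== SOURCE B (Python) =====
-- def _prioritize_logo_images(image_urls: list[str]) -> list[str]:
--     # Single pass: dedup and stable-partition into logo/non-logo lists, then concatenate.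
--     seen: set[str] = set()
--     logos: list[str] = []
--     others: list[str] = []
--     for url in image_urls:
--         value = (url or "").strip()
--         if not value or value in seen:
--             continue
--         seen.add(value)
--         if "logo" in value.lower():
--             logos.append(value)
--         else:
--             others.append(value)
--     return logos + others
-- ===== Notes on version B (the rewrite author's own statement) =====
-- stated objective: alternative
-- what changed: replaces the dedup-then-stable-sort-by-boolean-key pipeline with a single pass that deduplicates and stably partitions URLs into logo/non-logo lists, returning their concatenation with no sort
import Mathlib
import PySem

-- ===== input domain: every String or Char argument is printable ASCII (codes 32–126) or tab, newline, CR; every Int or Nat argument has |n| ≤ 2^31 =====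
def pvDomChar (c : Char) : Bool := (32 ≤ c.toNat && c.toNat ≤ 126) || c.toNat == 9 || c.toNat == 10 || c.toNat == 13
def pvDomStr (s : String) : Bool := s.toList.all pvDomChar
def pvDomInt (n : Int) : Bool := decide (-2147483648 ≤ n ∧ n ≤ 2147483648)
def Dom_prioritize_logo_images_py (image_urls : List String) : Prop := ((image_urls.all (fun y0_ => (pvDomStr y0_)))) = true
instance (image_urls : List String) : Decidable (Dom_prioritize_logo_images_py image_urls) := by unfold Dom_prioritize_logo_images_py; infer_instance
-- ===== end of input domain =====

-- B replaces A's dedup-then-stable-sort (boolean key) with one stable partition pass; the sort disappears.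

-- ===== PORT A =====
-- '(url or "").strip()' = 'url.strip()' on strings ("" is the only falsy str and strips to "").
def prioritize_logo_images_py (image_urls : List String) : List String :=
  let st := image_urls.foldl
    (fun (st : List String × PySem.Set String) url =>
      let value := PySem.Str.strip url
      if value == "" || PySem.Set.contains st.2 value then st
      else (st.1 ++ [value], PySem.Set.add st.2 value))
    ([], PySem.Set.empty)
  PySem.List.sorted st.1 (fun url => !(PySem.Str.isIn "logo" (PySem.Str.lower url))) false

-- ===== PORT B =====
def prioritize_logo_images_py_alt (image_urls : List String) : List String :=
  let st := image_urls.foldl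
    (fun (st : PySem.Set String × List String × List String) url =>
      let value := PySem.Str.strip url
      if value == "" || PySem.Set.contains st.1 value then st
      else if PySem.Str.isIn "logo" (PySem.Str.lower value) then
        (PySem.Set.add st.1 value, st.2.1 ++ [value], st.2.2)
      else
        (PySem.Set.add st.1 value, st.2.1, st.2.2 ++ [value]))
    (PySem.Set.empty, [], [])
  st.2.1 ++ st.2.2

-- ===== PRECONDITION & SPEC =====
def Spec_prioritize_logo_images_py (image_urls : List String) (out : List String) : Prop := out = prioritize_logo_images_py_alt image_urls
instance (image_urls : List String) (out : List String) : Decidable (Spec_prioritize_logo_images_py image_urls out) := by unfold Spec_prioritize_logo_images_py; infer_instance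

-- ===== CLAIM (what is proved, stated in full; the proofs are below) =====
def Claim_equal_prioritize_logo_images_py : Prop := ∀ (image_urls : List String), Dom_prioritize_logo_images_py image_urls → Spec_prioritize_logo_images_py image_urls (prioritize_logo_images_py image_urls)

-- ===== LEMMAS AND PROOFS =====

-- inserting a false-key element goes right before the true-key block (stability of A's sort)
theorem insertBy_bool_false {α : Type} (key : α → Bool) (x : α) (hx : key x = false) :
    ∀ (F T : List α), (∀ y ∈ F, key y = false) → (∀ y ∈ T, key y = true) →
    PySem.List.insertBy (fun a b => decide (key a < key b)) x (F ++ T) = F ++ x :: T := by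
  intro F
  induction F with
  | nil =>
    intro T _ hT
    cases T with
    | nil => rfl
    | cons t ts =>
      have := hT t (by simp)
      simp [PySem.List.insertBy, hx, this]
  | cons f fs ih =>
    intro T hF hT
    have hf := hF f (by simp)
    simp only [List.cons_append, PySem.List.insertBy, hx, hf]
    simp [ih T (fun y hy => hF y (by simp [hy])) hT]

-- inserting a true-key element appends at the end
theorem insertBy_bool_true {α : Type} (key : α → Bool) (x : α) (hx : key x = true)
    (ys : List α) :
    PySem.List.insertBy (fun a b => decide (key a < key b)) x ys = ys ++ [x] := by
  apply PySem.List.insertBy_of_forall_not_before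
  intro y _
  simp [hx]

-- A's stable sort by a boolean key is the stable partition
theorem sorted_bool {α : Type} (key : α → Bool) (xs : List α) :
    PySem.List.sorted xs key false
      = xs.filter (fun x => !key x) ++ xs.filter key := by
  rw [PySem.List.sorted_eq_foldl_insertBy]
  suffices h : ∀ (l F T : List α), (∀ y ∈ F, key y = false) → (∀ y ∈ T, key y = true) →
      l.foldl (fun acc x => PySem.List.insertBy (fun a b => decide (key a < key b)) x acc) (F ++ T)
        = (F ++ l.filter (fun x => !key x)) ++ (T ++ l.filter key) by
    simpa using h xs [] [] (by simp) (by simp)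
  intro l
  induction l with
  | nil => intro F T _ _; simp
  | cons x xs ih =>
    intro F T hF hT
    cases hx : key x with
    | false =>
      have hstep := insertBy_bool_false key x hx F T hF hT
      simp only [List.foldl_cons, hstep]
      have := ih (F ++ [x]) T
        (by intro y hy; rcases List.mem_append.mp hy with h | h
            · exact hF y h
            · simp at h; simpa [h] using hx) hT
      simp only [List.append_assoc, List.singleton_append] at this ⊢
      rw [this]
      simp [hx]
    | true =>
      have hstep := insertBy_bool_true key x hx (F ++ T)
      simp only [List.foldl_cons, hstep, List.append_assoc]
      have := ih F (T ++ [x]) hF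
        (by intro y hy; rcases List.mem_append.mp hy with h | h
            · exact hT y h
            · simp at h; simpa [h] using hx)
      rw [this]
      simp [hx]

-- the two folds run in lockstep: B's lists are the filters of A's unique list
theorem fold_corr (xs : List String) :
    ∀ (s : PySem.Set String) (u : List String),
    xs.foldl
      (fun (st : PySem.Set String × List String × List String) url =>
        let value := PySem.Str.strip url
        if value == "" || PySem.Set.contains st.1 value then st
        else if PySem.Str.isIn "logo" (PySem.Str.lower value) then
          (PySem.Set.add st.1 value, st.2.1 ++ [value], st.2.2)
        else
          (PySem.Set.add st.1 value, st.2.1, st.2.2 ++ [value]))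
      (s, u.filter (fun v => PySem.Str.isIn "logo" (PySem.Str.lower v)),
          u.filter (fun v => !PySem.Str.isIn "logo" (PySem.Str.lower v)))
    =
    (let r := xs.foldl
      (fun (st : List String × PySem.Set String) url =>
        let value := PySem.Str.strip url
        if value == "" || PySem.Set.contains st.2 value then st
        else (st.1 ++ [value], PySem.Set.add st.2 value)) (u, s)
     (r.2, r.1.filter (fun v => PySem.Str.isIn "logo" (PySem.Str.lower v)),
           r.1.filter (fun v => !PySem.Str.isIn "logo" (PySem.Str.lower v)))) := by
  induction xs with
  | nil => intro s u; rfl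
  | cons x xs ih =>
    intro s u
    simp only [List.foldl_cons]
    by_cases hskip : (PySem.Str.strip x == "" || PySem.Set.contains s (PySem.Str.strip x)) = true
    · simp only [hskip]
      exact ih s u
    · simp only [hskip]
      by_cases hk : PySem.Str.isIn "logo" (PySem.Str.lower (PySem.Str.strip x)) = true
      · have hk' := hk; simp at hk'
        simp only [hk, if_true, if_false, Bool.false_eq_true]
        have := ih (PySem.Set.add s (PySem.Str.strip x)) (u ++ [PySem.Str.strip x])
        simpa [List.filter_append, List.filter_cons, hk'] using this
      · have hk' := hk; simp at hk'
        simp only [hk, if_false, Bool.false_eq_true]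
        have := ih (PySem.Set.add s (PySem.Str.strip x)) (u ++ [PySem.Str.strip x])
        simpa [List.filter_append, List.filter_cons, hk'] using this

-- ===== VERDICT (by name: the statement is the Claim_ definition above) =====
theorem prioritize_logo_images_py_spec : Claim_equal_prioritize_logo_images_py := by
  intro image_urls _
  unfold Spec_prioritize_logo_images_py prioritize_logo_images_py prioritize_logo_images_py_alt
  have hcorr := fold_corr image_urls PySem.Set.empty []
  simp only [List.filter_nil] at hcorr
  rw [hcorr]
  rw [sorted_bool]
  simp
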